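-- pv_equiv track=rewrite | github.com/ritakalach/pramp-solutions | code/validate_ip_address.py | is_valid_num
-- ===== SOURCE A (Python) =====
-- def is_valid_num(num):
--   if not num:
--     return False
--
--   # Check that each character in num is a digit 0-9
--   for digit in num:
--     if digit < '0' or digit > '9': # if not digit.isdigit():
--       return False
--
--   # Check for leading zeros
--   # E.g. '4' should return True, '04' and '004' should return False.
--   if len(num) > 1 and num[0] == '0':
--     return False
--
--   # Check that num is in the range 0-255
--   if int(num) < 0 or int(num) > 255:
--     return False
--
--   return True
-- ===== SOURCE B (Python) =====
-- import re
--
-- _OCTET = re.compile(r'25[0-5]|2[0-4][0-9]|1[0-9][0-9]|[1-9][0-9]|[0-9]')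
--
-- def is_valid_num(num):
--   return bool(_OCTET.fullmatch(num))
-- ===== Notes on version B (the rewrite author's own statement) =====
-- stated objective: idiomatic
-- what changed: Replaced A's explicit character loop, leading-zero test and int() range comparison by a single re.fullmatch against the octet grammar 25[0-5]|2[0-4][0-9]|1[0-9][0-9]|[1-9][0-9]|[0-9], which encodes the no-leading-zero rule and the 0-255 range directly in the pattern.
import Mathlib
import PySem

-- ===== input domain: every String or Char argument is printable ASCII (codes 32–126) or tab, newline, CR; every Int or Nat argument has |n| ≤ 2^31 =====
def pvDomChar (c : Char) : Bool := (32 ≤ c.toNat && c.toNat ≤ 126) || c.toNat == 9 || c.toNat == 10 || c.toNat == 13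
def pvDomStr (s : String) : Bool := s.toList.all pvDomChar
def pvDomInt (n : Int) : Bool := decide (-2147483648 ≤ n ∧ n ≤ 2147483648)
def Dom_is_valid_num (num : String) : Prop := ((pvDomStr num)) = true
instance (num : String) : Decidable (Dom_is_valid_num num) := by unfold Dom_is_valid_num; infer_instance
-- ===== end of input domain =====

-- B replaces A's char loop + leading-zero check + int() range check by a single regular
-- expression fullmatch over the octet grammar (objective: idiomatic; no speed claim).

-- ===== PORT A =====
-- Python's int(num) on the strings on which A reaches it (nonempty, every char in '0'..'9',
-- so no whitespace/sign/underscore case arises): the plain decimal digit fold. Exact there.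
def pvIntOfDigits (cs : List Char) : Int :=
  cs.foldl (fun a c => 10 * a + ((c.toNat : Int) - 48)) 0

-- 'for digit in num: if digit < '0' or digit > '9': return False' — early exit iff some char fails
def pvHasNonDigit (cs : List Char) : Bool :=
  cs.any (fun c => decide (c < '0') || decide ('9' < c))

def pvValidA (cs : List Char) : Bool :=
  if cs.isEmpty then false                                                 -- if not num
  else if pvHasNonDigit cs then false                                      -- the digit loop
  else if cs.length > 1 && (PySem.List.pyGetD cs 0 ' ' == '0') then false  -- leading zero
  else if pvIntOfDigits cs < 0 || 255 < pvIntOfDigits cs then false        -- range 0-255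
  else true

def is_valid_num (num : String) : Bool := pvValidA num.toList

-- ===== PORT B =====
-- re.fullmatch(r'25[0-5]|2[0-4][0-9]|1[0-9][0-9]|[1-9][0-9]|[0-9]', num): each alternative
-- fixes the length it matches, so fullmatch is a case split on the character list.
def pvValidB (cs : List Char) : Bool :=
  match cs with
  | [a, b, c] =>
      (a == '2' && b == '5' && decide ('0' ≤ c) && decide (c ≤ '5'))       -- 25[0-5]
      || (a == '2' && decide ('0' ≤ b) && decide (b ≤ '4')
            && decide ('0' ≤ c) && decide (c ≤ '9'))                       -- 2[0-4][0-9]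
      || (a == '1' && decide ('0' ≤ b) && decide (b ≤ '9')
            && decide ('0' ≤ c) && decide (c ≤ '9'))                       -- 1[0-9][0-9]
  | [a, b] => decide ('1' ≤ a) && decide (a ≤ '9')
      && decide ('0' ≤ b) && decide (b ≤ '9')                              -- [1-9][0-9]
  | [a] => decide ('0' ≤ a) && decide (a ≤ '9')                            -- [0-9]
  | _ => false

def is_valid_num_alt (num : String) : Bool := pvValidB num.toList

-- ===== PRECONDITION & SPEC =====
def Spec_is_valid_num (num : String) (out : Bool) : Prop := out = is_valid_num_alt num
instance (num : String) (out : Bool) : Decidable (Spec_is_valid_num num out) := by unfold Spec_is_valid_num; infer_instance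

-- ===== CLAIM (what is proved, stated in full; the proofs are below) =====
def Claim_equal_is_valid_num : Prop := ∀ (num : String), Dom_is_valid_num num → Spec_is_valid_num num (is_valid_num num)

-- ===== LEMMAS AND PROOFS =====

-- lower bound for the digit fold: digits only ever grow a nonnegative accumulator tenfold
theorem pvIntOfDigits_fold_lb (cs : List Char) (a : Int)
    (h : ∀ c ∈ cs, 48 ≤ c.toNat) (ha : 0 ≤ a) :
    a * 10 ^ cs.length ≤ cs.foldl (fun a c => 10 * a + ((c.toNat : Int) - 48)) a := by
  induction cs generalizing a with
  | nil => simp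
  | cons c cs ih =>
    have h48 : (48 : Int) ≤ (c.toNat : Int) := by exact_mod_cast h c (by simp)
    have step : 0 ≤ 10 * a + ((c.toNat : Int) - 48) := by nlinarith
    have hrec := ih (10 * a + ((c.toNat : Int) - 48)) (fun d hd => h d (by simp [hd])) step
    have hpow : (0:Int) ≤ 10 ^ cs.length := by positivity
    calc a * 10 ^ (c :: cs).length
        = (10 * a) * 10 ^ cs.length := by
          simp [List.length_cons, pow_succ]; ring
      _ ≤ (10 * a + ((c.toNat : Int) - 48)) * 10 ^ cs.length := by nlinarith
      _ ≤ _ := hrec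

-- both ports agree on every digit payload of length 1–3 (decidable enumeration)
theorem pv_small_cases :
    ∀ (i j k : Fin 10),
      pvValidA [Char.ofNat (48 + i)] = pvValidB [Char.ofNat (48 + i)] ∧
      pvValidA [Char.ofNat (48 + i), Char.ofNat (48 + j)] = pvValidB [Char.ofNat (48 + i), Char.ofNat (48 + j)] ∧
      pvValidA [Char.ofNat (48 + i), Char.ofNat (48 + j), Char.ofNat (48 + k)] = pvValidB [Char.ofNat (48 + i), Char.ofNat (48 + j), Char.ofNat (48 + k)] := by
  decide

-- a character of a digit-only list is Char.ofNat of 48 + its digit value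
theorem pv_digit_char (c : Char) (h0 : ¬ c < '0') (h9 : ¬ '9' < c) :
    c = Char.ofNat (48 + (c.toNat - 48)) ∧ c.toNat - 48 < 10 := by
  have hl : 48 ≤ c.toNat := Nat.le_of_not_lt h0
  have hu : c.toNat ≤ 57 := Nat.le_of_not_lt h9
  refine ⟨?_, by omega⟩
  have : 48 + (c.toNat - 48) = c.toNat := by omega
  rw [this, Char.ofNat_toNat]

-- if the regex matches, every character of the string is a digit
theorem pv_bnd {c hi : Char} (h : ('0':Char) ≤ c) (h' : c ≤ hi) (hh : hi ≤ ('9':Char)) :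
    ¬ c < '0' ∧ ¬ '9' < c :=
  ⟨Nat.not_lt.mpr h, Nat.not_lt.mpr (Nat.le_trans h' hh)⟩

theorem pvValidB_true_digits (cs : List Char) (h : pvValidB cs = true) :
    ∀ c ∈ cs, ¬ c < '0' ∧ ¬ '9' < c := by
  intro c hc
  match cs with
  | [a, b, d] =>
    simp only [pvValidB, Bool.or_eq_true, Bool.and_eq_true, beq_iff_eq,
      decide_eq_true_eq] at h
    simp only [List.mem_cons, List.not_mem_nil, or_false] at hc
    rcases h with (⟨⟨⟨e1, e2⟩, e3⟩, e4⟩ | ⟨⟨⟨⟨e1, e2⟩, e3⟩, e4⟩, e5⟩) | ⟨⟨⟨⟨e1, e2⟩, e3⟩, e4⟩, e5⟩ <;>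
      rcases hc with rfl | rfl | rfl
    · exact e1 ▸ ⟨by decide, by decide⟩
    · exact e2 ▸ ⟨by decide, by decide⟩
    · exact pv_bnd e3 e4 (by decide)
    · exact e1 ▸ ⟨by decide, by decide⟩
    · exact pv_bnd e2 e3 (by decide)
    · exact pv_bnd e4 e5 (by decide)
    · exact e1 ▸ ⟨by decide, by decide⟩
    · exact pv_bnd e2 e3 (by decide)
    · exact pv_bnd e4 e5 (by decide)
  | [a, b] =>
    simp only [pvValidB, Bool.and_eq_true, decide_eq_true_eq] at h
    obtain ⟨⟨⟨h1, h2⟩, h3⟩, h4⟩ := h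
    simp only [List.mem_cons, List.not_mem_nil, or_false] at hc
    rcases hc with rfl | rfl
    · exact pv_bnd (Nat.le_trans (by decide : ('0':Char) ≤ '1') h1) h2 (by decide)
    · exact pv_bnd h3 h4 (by decide)
  | [a] =>
    simp only [pvValidB, Bool.and_eq_true, decide_eq_true_eq] at h
    simp only [List.mem_cons, List.not_mem_nil, or_false] at hc
    rcases hc with rfl
    exact pv_bnd h.1 h.2 (by decide)
  | [] => cases h
  | a :: b :: d :: e :: t => cases h

-- on an all-digit list the two ports agree
theorem pv_digits_agree (cs : List Char)
    (hall : ∀ c ∈ cs, ¬ c < '0' ∧ ¬ '9' < c) : pvValidA cs = pvValidB cs := by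
  match cs with
  | [] => rfl
  | [a] =>
    obtain ⟨ha, hia⟩ := pv_digit_char a (hall a (by simp)).1 (hall a (by simp)).2
    rw [ha]
    exact (pv_small_cases ⟨_, hia⟩ 0 0).1
  | [a, b] =>
    obtain ⟨ha, hia⟩ := pv_digit_char a (hall a (by simp)).1 (hall a (by simp)).2
    obtain ⟨hb, hib⟩ := pv_digit_char b (hall b (by simp)).1 (hall b (by simp)).2
    rw [ha, hb]
    exact (pv_small_cases ⟨_, hia⟩ ⟨_, hib⟩ 0).2.1
  | [a, b, c] =>
    obtain ⟨ha, hia⟩ := pv_digit_char a (hall a (by simp)).1 (hall a (by simp)).2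
    obtain ⟨hb, hib⟩ := pv_digit_char b (hall b (by simp)).1 (hall b (by simp)).2
    obtain ⟨hc, hic⟩ := pv_digit_char c (hall c (by simp)).1 (hall c (by simp)).2
    rw [ha, hb, hc]
    exact (pv_small_cases ⟨_, hia⟩ ⟨_, hib⟩ ⟨_, hic⟩).2.2
  | a :: b :: c :: d :: t =>
    -- length ≥ 4: B is false by its catch-all; A is false because the value is ≥ 1000
    have hB : pvValidB (a :: b :: c :: d :: t) = false := rfl
    rw [hB]
    have hnd : pvHasNonDigit (a :: b :: c :: d :: t) = false := by
      simp only [pvHasNonDigit, List.any_eq_false]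
      intro x hx hcon
      simp only [Bool.or_eq_true, decide_eq_true_eq] at hcon
      rcases hcon with hh | hh
      · exact (hall x hx).1 hh
      · exact (hall x hx).2 hh
    by_cases hz : a = '0'
    · -- leading zero branch of A fires
      subst hz
      simp [pvValidA, hnd, PySem.List.pyGetD_zero_cons]
    · -- first digit ≥ 1, so the value is at least 10^(3+|t|) ≥ 1000 > 255
      have ha48 : 48 ≤ a.toNat := Nat.le_of_not_lt (hall a (by simp)).1
      have ha57 : a.toNat ≤ 57 := Nat.le_of_not_lt (hall a (by simp)).2
      have ha49 : 49 ≤ a.toNat := by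
        rcases Nat.lt_or_ge a.toNat 49 with h | h
        · exfalso; apply hz
          have : a.toNat = 48 := by omega
          calc a = Char.ofNat a.toNat := (Char.ofNat_toNat a).symm
            _ = '0' := by rw [this]
        · exact h
      have hrest : ∀ x ∈ b :: c :: d :: t, 48 ≤ x.toNat := by
        intro x hx
        exact Nat.le_of_not_lt (hall x (by simp at hx ⊢; tauto)).1
      have hlb := pvIntOfDigits_fold_lb (b :: c :: d :: t) ((a.toNat : Int) - 48)
        hrest (by omega)
      have h1 : (1 : Int) ≤ (a.toNat : Int) - 48 := by
        have : (49 : Int) ≤ (a.toNat : Int) := by exact_mod_cast ha49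
        omega
      have hlen : (b :: c :: d :: t).length = 3 + t.length := by simp; omega
      have hpow : (1000 : Int) ≤ 10 ^ (b :: c :: d :: t).length := by
        rw [hlen]
        calc (1000 : Int) = 10 ^ 3 := by norm_num
          _ ≤ 10 ^ (3 + t.length) := by
              apply pow_le_pow_right₀ (by norm_num) (by omega)
      have hval : 1000 ≤ pvIntOfDigits (a :: b :: c :: d :: t) := by
        have : pvIntOfDigits (a :: b :: c :: d :: t)
            = (b :: c :: d :: t).foldl (fun x y => 10 * x + ((y.toNat : Int) - 48))
                ((a.toNat : Int) - 48) := by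
          simp [pvIntOfDigits, List.foldl_cons]
        rw [this]
        calc (1000 : Int) ≤ 1 * 10 ^ (b :: c :: d :: t).length := by
              rw [one_mul]; exact hpow
          _ ≤ ((a.toNat : Int) - 48) * 10 ^ (b :: c :: d :: t).length := by
              have : (0:Int) ≤ 10 ^ (b :: c :: d :: t).length := by positivity
              nlinarith
          _ ≤ _ := hlb
      simp only [pvValidA, List.isEmpty_cons, hnd, Bool.false_eq_true, if_false]
      have : (255 : Int) < pvIntOfDigits (a :: b :: c :: d :: t) := by omega
      simp [this]

-- ===== VERDICT (by name: the statement is the Claim_ definition above) =====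
theorem is_valid_num_spec : Claim_equal_is_valid_num := by
  intro num _
  unfold Spec_is_valid_num is_valid_num is_valid_num_alt
  by_cases hnd : pvHasNonDigit num.toList = true
  · -- some character fails A's digit loop: A is false, and B cannot match
    have hA : pvValidA num.toList = false := by
      cases h : num.toList with
      | nil => rfl
      | cons x xs => simp [pvValidA, h ▸ hnd]
    have hB : pvValidB num.toList = false := by
      cases hbb : pvValidB num.toList with
      | false => rfl
      | true =>
        exfalso
        simp only [pvHasNonDigit, List.any_eq_true, Bool.or_eq_true,
          decide_eq_true_eq] at hnd
        obtain ⟨x, hx, hbad⟩ := hnd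
        have := pvValidB_true_digits num.toList hbb x hx
        tauto
    rw [hA, hB]
  · have hall : ∀ c ∈ num.toList, ¬ c < '0' ∧ ¬ '9' < c := by
      simp only [pvHasNonDigit, List.any_eq_true, Bool.or_eq_true,
        decide_eq_true_eq] at hnd
      intro c hc
      constructor <;> intro h <;> exact hnd ⟨c, hc, by tauto⟩
    exact pv_digits_agree num.toList hall
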